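-- pv_equiv track=rewrite | github.com/eliottcassidy2000/math | 04-computation/n6_discriminant_89b.py | vertex_sharing_pairs
-- ===== SOURCE A (Python) =====
-- def vertex_sharing_pairs(triples):
--     """Count pairs of 3-cycles sharing exactly 1 vertex."""
--     count = 0
--     for idx1 in range(len(triples)):
--         for idx2 in range(idx1+1, len(triples)):
--             s1 = set(triples[idx1])
--             s2 = set(triples[idx2])
--             if len(s1 & s2) == 1:
--                 count += 1
--     return count
-- ===== SOURCE B (Python) =====
-- def _pairs(m):
--     out = []
--     rest = m
--     while rest:
--         head, rest = rest[0], rest[1:]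
--         out += [(head, y) for y in rest]
--     return out
--
-- def vertex_sharing_pairs(triples):
--     """Count pairs of 3-cycles sharing exactly 1 vertex (vertex-indexed buckets instead of all-pairs intersection)."""
--     buckets = {}
--     for i, t in enumerate(triples):
--         for v in set(t):
--             buckets[v] = buckets.get(v, []) + [i]
--     shared = {}
--     for m in buckets.values():
--         for k in _pairs(m):
--             shared[k] = shared.get(k, 0) + 1
--     return sum(1 for c in shared.values() if c == 1)
-- ===== Notes on version B (the rewrite author's own statement) =====
-- stated objective: faster
-- what changed: Instead of intersecting every pair of triple vertex-sets (A's quadratic double loop), B builds a hash map from each vertex to the list of triple indices containing it, counts every co-bucket index pair in a counter dict, and returns the number of index pairs counted exactly once (= pairs whose vertex-set intersection has size exactly 1).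
import Mathlib
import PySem

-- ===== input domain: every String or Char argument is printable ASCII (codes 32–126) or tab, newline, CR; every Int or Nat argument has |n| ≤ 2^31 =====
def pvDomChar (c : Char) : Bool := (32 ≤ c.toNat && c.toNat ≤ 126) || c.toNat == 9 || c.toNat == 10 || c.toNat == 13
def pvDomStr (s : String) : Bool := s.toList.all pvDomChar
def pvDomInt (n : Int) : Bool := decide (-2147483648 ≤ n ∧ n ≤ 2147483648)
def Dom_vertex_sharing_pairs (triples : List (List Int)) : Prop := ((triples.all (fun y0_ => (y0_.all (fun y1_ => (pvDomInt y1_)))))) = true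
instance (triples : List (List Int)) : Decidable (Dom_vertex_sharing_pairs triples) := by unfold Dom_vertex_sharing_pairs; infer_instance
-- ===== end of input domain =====

-- B replaces A's all-pairs set-intersection scan by vertex-indexed buckets of triple
-- indices and a counter of co-occurring index pairs (objective: faster on typical inputs).

-- ===== PORT A =====
def vertex_sharing_pairs (triples : List (List Int)) : Int :=
  (PySem.List.pyRange 0 (PySem.List.len triples) 1).foldl (fun count idx1 =>
    (PySem.List.pyRange (idx1 + 1) (PySem.List.len triples) 1).foldl (fun count idx2 =>
      let s1 := PySem.Set.ofList (PySem.List.pyGetD triples idx1 [])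
      let s2 := PySem.Set.ofList (PySem.List.pyGetD triples idx2 [])
      if PySem.Set.len (PySem.Set.inter s1 s2) = 1 then count + 1 else count) count) 0

-- ===== PORT B =====
-- _pairs(m): while-loop over the suffix, accumulating (head, y) pairs
def pvPairsAux : List Int → List (Int × Int) → List (Int × Int)
  | [], out => out
  | head :: rest, out => pvPairsAux rest (out ++ rest.map (fun y => (head, y)))

def vertex_sharing_pairs_alt (triples : List (List Int)) : Int :=
  let buckets := (PySem.List.enumerate triples 0).foldl
    (fun d p => (PySem.Set.ofList p.2).foldl (fun d v => d.modify v [] (fun l => l ++ [p.1])) d)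
    PySem.Dict.empty
  let shared := buckets.values.foldl
    (fun d m => (pvPairsAux m []).foldl (fun d k => d.insert k (d.getD k 0 + 1)) d)
    (PySem.Dict.empty : PySem.Dict (Int × Int) Int)
  shared.values.foldl (fun acc c => if c = 1 then acc + 1 else acc) 0

-- ===== PRECONDITION & SPEC =====
def Spec_vertex_sharing_pairs (triples : List (List Int)) (out : Int) : Prop := out = vertex_sharing_pairs_alt triples
instance (triples : List (List Int)) (out : Int) : Decidable (Spec_vertex_sharing_pairs triples out) := by unfold Spec_vertex_sharing_pairs; infer_instance

-- ===== CLAIM (what is proved, stated in full; the proofs are below) =====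
def Claim_equal_vertex_sharing_pairs : Prop := ∀ (triples : List (List Int)), Dom_vertex_sharing_pairs triples → Spec_vertex_sharing_pairs triples (vertex_sharing_pairs triples)

-- ===== LEMMAS AND PROOFS =====

-- incidence list: one (vertex, triple-index) pair per distinct vertex of each triple
def pvI (triples : List (List Int)) : List (Int × Int) :=
  (PySem.List.enumerate triples 0).flatMap (fun p => (PySem.Set.ofList p.2).map (fun v => (v, p.1)))

-- bucket of v: indices (in order) of the triples containing v
def pvBv (triples : List (List Int)) (v : Int) : List Int :=
  ((PySem.List.enumerate triples 0).filter (fun p => decide (v ∈ PySem.Set.ofList p.2))).map (fun p => p.1)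

-- distinct vertices, in first-occurrence order
def pvV (triples : List (List Int)) : List Int := PySem.Set.ofList ((pvI triples).map Prod.fst)

-- all ordered pairs of elements of m (positions a < b), structurally
def pvPairs : List Int → List (Int × Int)
  | [] => []
  | x :: r => r.map (fun y => (x, y)) ++ pvPairs r

-- the flat multiset of co-bucket index pairs
def pvL (triples : List (List Int)) : List (Int × Int) :=
  (pvV triples).flatMap (fun v => pvPairs (pvBv triples v))

-- A's pair predicate
def pvDelta (triples : List (List Int)) (p : Int × Int) : Bool :=
  decide (PySem.Set.len (PySem.Set.inter
    (PySem.Set.ofList (PySem.List.pyGetD triples p.1 []))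
    (PySem.Set.ofList (PySem.List.pyGetD triples p.2 []))) = 1)

-- all index pairs i < j
def pvAllPairs (triples : List (List Int)) : List (Int × Int) :=
  (PySem.List.pyRange 0 (PySem.List.len triples) 1).flatMap
    (fun i => (PySem.List.pyRange (i + 1) (PySem.List.len triples) 1).map (fun j => (i, j)))

-- nested foldl over chunks = foldl over the flattened list
theorem pv_foldl_flatten {α β γ : Type} (g : α → List β) (f : γ → β → γ) (l : List α) (init : γ) :
    l.foldl (fun d m => (g m).foldl f d) init = (l.flatMap g).foldl f init := by
  induction l generalizing init with
  | nil => rfl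
  | cons x xs ih => simp [List.flatMap_cons, List.foldl_append, ih]

theorem pvPairsAux_eq (m : List Int) (out : List (Int × Int)) :
    pvPairsAux m out = out ++ pvPairs m := by
  induction m generalizing out with
  | nil => simp [pvPairsAux, pvPairs]
  | cons x r ih => simp [pvPairsAux, pvPairs, ih]

theorem pv_sum_ite_eq_countP {α : Type} (P : α → Prop) [DecidablePred P] (l : List α) :
    (l.map (fun v => if P v then 1 else 0)).sum = l.countP (fun v => decide (P v)) := by
  induction l with
  | nil => rfl
  | cons x xs ih => by_cases h : P x <;> simp [h, ih, Nat.add_comm]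

theorem pv_nodup_count {α : Type} [BEq α] [LawfulBEq α] (l : List α) (h : l.Nodup) (a : α) :
    l.count a = if a ∈ l then 1 else 0 := by
  by_cases hm : a ∈ l
  · simp [hm, List.count_eq_one_of_mem h hm]
  · simp [hm, List.count_eq_zero_of_not_mem hm]

theorem pv_countP_nodup_ext {α : Type} (p1 p2 : α → Bool) (l1 l2 : List α)
    (h1 : l1.Nodup) (h2 : l2.Nodup)
    (h : ∀ x, (x ∈ l1 ∧ p1 x) ↔ (x ∈ l2 ∧ p2 x)) :
    l1.countP p1 = l2.countP p2 := by
  rw [List.countP_eq_length_filter, List.countP_eq_length_filter]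
  refine List.Perm.length_eq ?_
  rw [List.perm_ext_iff_of_nodup (h1.filter _) (h2.filter _)]
  intro a
  simp only [List.mem_filter]
  exact h a

theorem pvPairs_count (m : List Int) (hm : m.Pairwise (· < ·)) (p : Int × Int) :
    (pvPairs m).count p = if p.1 ∈ m ∧ p.2 ∈ m ∧ p.1 < p.2 then 1 else 0 := by
  induction m with
  | nil => simp [pvPairs]
  | cons x r ih =>
    obtain ⟨hx, hr⟩ := List.pairwise_cons.mp hm
    have hnd : r.Nodup := hr.imp (fun h => ne_of_lt h)
    have hxr : x ∉ r := fun hc => lt_irrefl x (hx x hc)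
    have hmap : (r.map (fun y => (x, y))).count p = if p.1 = x ∧ p.2 ∈ r then 1 else 0 := by
      obtain ⟨p1, p2⟩ := p
      by_cases h1 : p1 = x
      · subst h1
        have hinj : Function.Injective (fun y => (p1, y) : Int → Int × Int) := by
          intro a b hab; simpa using hab
        rw [show ((p1, p2) : Int × Int) = (fun y => (p1, y)) p2 from rfl,
          List.count_map_of_injective r _ hinj]
        simp [pv_nodup_count r hnd]
      · have : (p1, p2) ∉ r.map (fun y => (x, y)) := by
          simp only [List.mem_map]
          rintro ⟨y, -, hy⟩
          exact h1 (by simpa using congrArg Prod.fst hy.symm)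
        simp [List.count_eq_zero_of_not_mem this, h1]
    rw [pvPairs, List.count_append, hmap, ih hr]
    by_cases h1 : p.1 = x
    · subst h1
      simp only [List.mem_cons, hxr]
      by_cases h2 : p.2 ∈ r
      · simp [h2, hx p.2 h2]
      · simp only [h2, and_false, false_and, or_false, if_false, true_and, add_zero]
        rw [if_neg]
        intro hcon
        omega
    · simp only [List.mem_cons, h1, false_and, if_false, false_or, zero_add]
      by_cases hp1 : p.1 ∈ r
      · by_cases h2x : p.2 = x
        · subst h2x
          have : ¬ p.2 < p.1 → True := fun _ => trivial
          rw [if_neg, if_neg]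
          · rintro ⟨-, -, hlt⟩
            exact absurd (hx p.1 hp1) (by omega)
          · rintro ⟨-, h2r, hlt⟩
            rcases h2r with h2r
            exact absurd (hx p.1 hp1) (by omega)
        · simp [hp1, h2x]
      · simp [hp1]


theorem pvBv_pairwise (triples : List (List Int)) (v : Int) :
    (pvBv triples v).Pairwise (· < ·) := by
  unfold pvBv
  refine List.Pairwise.map _ (fun a b h => h) ?_
  exact (PySem.List.pairwise_lt_enumerate triples 0).filter _

theorem pvBv_mem (triples : List (List Int)) (v : Int) (i : Int) :
    i ∈ pvBv triples v ↔ ∃ k : Nat, ∃ h : k < triples.length, i = (k : Int) ∧ v ∈ PySem.Set.ofList triples[k] := by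
  unfold pvBv
  simp only [List.mem_map, List.mem_filter, PySem.List.mem_enumerate_iff, decide_eq_true_eq]
  constructor
  · rintro ⟨p, ⟨⟨k, hk, rfl⟩, hv⟩, rfl⟩
    exact ⟨k, hk, by simp, hv⟩
  · rintro ⟨k, hk, rfl, hv⟩
    exact ⟨((k : Int), triples[k]), ⟨⟨k, hk, by simp⟩, hv⟩, rfl⟩

theorem pvV_mem (triples : List (List Int)) (v : Int) :
    v ∈ pvV triples ↔ ∃ k : Nat, ∃ h : k < triples.length, v ∈ PySem.Set.ofList triples[k] := by
  unfold pvV pvI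
  rw [PySem.Set.mem_ofList]
  simp only [List.mem_map, List.mem_flatMap, PySem.List.mem_enumerate_iff]
  constructor
  · rintro ⟨q, ⟨p, ⟨k, hk, rfl⟩, hq⟩, rfl⟩
    obtain ⟨u, hu, rfl⟩ := hq
    exact ⟨k, hk, hu⟩
  · rintro ⟨k, hk, hv⟩
    exact ⟨(v, (k : Int)), ⟨((k : Int), triples[k]), ⟨k, hk, by simp⟩, by simp [(PySem.Set.mem_ofList _ _).mp hv]⟩, rfl⟩


theorem pvL_count (triples : List (List Int)) (p : Int × Int) :
    (pvL triples).count p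
      = (pvV triples).countP (fun v => decide (p.1 ∈ pvBv triples v ∧ p.2 ∈ pvBv triples v ∧ p.1 < p.2)) := by
  unfold pvL
  rw [List.count_flatMap]
  rw [← pv_sum_ite_eq_countP]
  congr 1
  refine List.map_congr_left ?_
  intro v _
  simpa using pvPairs_count (pvBv triples v) (pvBv_pairwise triples v) p

theorem pvL_count_eq_inter (triples : List (List Int)) (i j : Nat)
    (hi : i < triples.length) (hj : j < triples.length) (hij : (i : Int) < (j : Int)) :
    (pvL triples).count ((i : Int), (j : Int))
      = (PySem.Set.inter (PySem.Set.ofList triples[i]) (PySem.Set.ofList triples[j])).length := by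
  rw [pvL_count]
  have hV : (pvV triples).Nodup := PySem.Set.nodup_ofList _
  have hSi : (PySem.Set.ofList triples[i] : List Int).Nodup := PySem.Set.nodup_ofList _
  show _ = (List.filter _ _).length
  rw [← List.countP_eq_length_filter]
  apply pv_countP_nodup_ext _ _ _ _ hV hSi
  intro x
  simp only [decide_eq_true_eq, pvBv_mem, pvV_mem, PySem.Set.contains,
    List.contains_iff_mem, PySem.Set.mem_ofList]
  constructor
  · rintro ⟨-, ⟨k1, hk1, he1, hx1⟩, ⟨k2, hk2, he2, hx2⟩, -⟩
    have : k1 = i := by omega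
    subst this
    have : k2 = j := by omega
    subst this
    exact ⟨hx1, hx2⟩
  · rintro ⟨hx1, hx2⟩
    refine ⟨⟨i, hi, hx1⟩, ⟨i, hi, rfl, hx1⟩, ⟨j, hj, rfl, hx2⟩, hij⟩

theorem pvL_mem_wf (triples : List (List Int)) (p : Int × Int) (hp : p ∈ pvL triples) :
    ∃ (i j : Nat), ∃ (_ : i < triples.length) (_ : j < triples.length),
      p = ((i : Int), (j : Int)) ∧ (i : Int) < (j : Int) := by
  unfold pvL at hp
  rw [List.mem_flatMap] at hp
  obtain ⟨v, -, hpp⟩ := hp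
  have hpos : 0 < (pvPairs (pvBv triples v)).count p := List.count_pos_iff.mpr hpp
  rw [pvPairs_count (pvBv triples v) (pvBv_pairwise triples v) p] at hpos
  have hcond : p.1 ∈ pvBv triples v ∧ p.2 ∈ pvBv triples v ∧ p.1 < p.2 := by
    by_contra h
    rw [if_neg h] at hpos
    exact lt_irrefl 0 hpos
  obtain ⟨h1, h2, hlt⟩ := hcond
  obtain ⟨k1, hk1, he1, -⟩ := (pvBv_mem triples v p.1).mp h1
  obtain ⟨k2, hk2, he2, -⟩ := (pvBv_mem triples v p.2).mp h2
  exact ⟨k1, k2, hk1, hk2, by rw [← he1, ← he2], by omega⟩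

theorem pvAllPairs_mem (triples : List (List Int)) (p : Int × Int) :
    p ∈ pvAllPairs triples ↔ 0 ≤ p.1 ∧ p.1 < p.2 ∧ p.2 < (triples.length : Int) := by
  obtain ⟨p1, p2⟩ := p
  unfold pvAllPairs
  simp only [List.mem_flatMap, List.mem_map, PySem.List.mem_pyRange_one, PySem.List.len_eq]
  constructor
  · rintro ⟨i, ⟨hi0, hin⟩, j, ⟨hj1, hjn⟩, heq⟩
    obtain ⟨rfl, rfl⟩ := Prod.mk.injEq i j p1 p2 ▸ heq
    exact ⟨hi0, by omega, hjn⟩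
  · rintro ⟨h0, h12, h2n⟩
    exact ⟨p1, ⟨h0, by omega⟩, p2, ⟨by omega, h2n⟩, rfl⟩

theorem pvAllPairs_nodup (triples : List (List Int)) : (pvAllPairs triples).Nodup := by
  unfold pvAllPairs
  rw [List.nodup_flatMap]
  constructor
  · intro i _
    refine (PySem.List.nodup_pyRange_one _ _).map ?_
    intro a b hab
    simpa using congrArg Prod.snd hab
  · refine (PySem.List.pairwise_lt_pyRange_one _ _).imp ?_
    intro a b hab
    simp only [Function.onFun, List.disjoint_left]
    intro x hxa
    obtain ⟨c, -, rfl⟩ := List.mem_map.mp hxa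
    intro hxb
    obtain ⟨c', -, hc⟩ := List.mem_map.mp hxb
    have := congrArg Prod.fst hc
    simp only at this
    omega

theorem pvDelta_eq (triples : List (List Int)) (i j : Nat)
    (hi : i < triples.length) (hj : j < triples.length) :
    pvDelta triples ((i : Int), (j : Int))
      = decide ((PySem.Set.inter (PySem.Set.ofList triples[i]) (PySem.Set.ofList triples[j])).length = 1) := by
  unfold pvDelta
  rw [decide_eq_decide]
  rw [PySem.List.pyGetD_natCast, PySem.List.pyGetD_natCast,
    List.getD_eq_getElem _ _ hi, List.getD_eq_getElem _ _ hj, PySem.Set.len_eq]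
  omega

-- A's double loop counts pvDelta over all index pairs
theorem pvA_eq (triples : List (List Int)) :
    vertex_sharing_pairs triples = ((pvAllPairs triples).countP (pvDelta triples) : Int) := by
  unfold vertex_sharing_pairs
  have hinner : (fun (count idx1 : Int) =>
      (PySem.List.pyRange (idx1 + 1) (PySem.List.len triples) 1).foldl (fun count idx2 =>
        let s1 := PySem.Set.ofList (PySem.List.pyGetD triples idx1 [])
        let s2 := PySem.Set.ofList (PySem.List.pyGetD triples idx2 [])
        if PySem.Set.len (PySem.Set.inter s1 s2) = 1 then count + 1 else count) count)
      = fun (count idx1 : Int) => count +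
        ((PySem.List.pyRange (idx1 + 1) (PySem.List.len triples) 1).countP
          (fun j => pvDelta triples (idx1, j)) : Int) := by
    funext c i
    have h := PySem.List.foldl_count_if (fun j => pvDelta triples (i, j))
      (PySem.List.pyRange (i + 1) (PySem.List.len triples) 1) c
    simpa [pvDelta] using h
  rw [hinner, PySem.List.foldl_add, zero_add]
  unfold pvAllPairs
  rw [List.countP_flatMap]
  rw [Nat.cast_list_sum, List.map_map]
  refine congrArg List.sum (List.map_congr_left ?_)
  intro i _
  simp only [Function.comp_apply, List.countP_map]
  rfl

-- B computes the number of distinct co-bucket pairs occurring exactly once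
theorem pvB_eq (triples : List (List Int)) :
    vertex_sharing_pairs_alt triples
      = ((PySem.Set.ofList (pvL triples)).countP (fun k => decide (((pvL triples).count k : Int) = 1)) : Int) := by
  unfold vertex_sharing_pairs_alt
  dsimp only
  have hb : (PySem.List.enumerate triples 0).foldl
      (fun d p => (PySem.Set.ofList p.2).foldl (fun d v => d.modify v [] (fun l => l ++ [p.1])) d)
      PySem.Dict.empty
      = (pvI triples).foldl (fun d q => d.modify q.1 [] (fun l => l ++ [q.2])) PySem.Dict.empty := by
    unfold pvI
    rw [← pv_foldl_flatten]
    congr 1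
    funext d p
    rw [List.foldl_map]
  rw [hb]
  have hkeys : ((pvI triples).foldl (fun d q => d.modify q.1 [] (fun l => l ++ [q.2]))
      PySem.Dict.empty).keys = pvV triples := by
    have h := PySem.Dict.keys_foldl_modify_key (pvI triples) (fun q => q.1) []
      (fun _ q => fun l => l ++ [q.2]) PySem.Dict.empty
    simp only [] at h
    rw [h]
    show PySem.Set.update ([] : List Int) _ = _
    rw [pvV, PySem.Set.ofList_eq_foldl]
    rfl
  have hnodup : ((pvI triples).foldl (fun d q => d.modify q.1 [] (fun l => l ++ [q.2]))
      PySem.Dict.empty).keys.Nodup := by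
    rw [hkeys]; exact PySem.Set.nodup_ofList _
  have hgetD : ∀ v, ((pvI triples).foldl (fun d q => d.modify q.1 [] (fun l => l ++ [q.2]))
      PySem.Dict.empty).getD v [] = pvBv triples v := by
    intro v
    rw [PySem.Dict.getD_foldl_modify_append, PySem.Dict.getD_empty, List.nil_append]
    have hfil : (pvI triples).filter (fun q => q.1 == v) = (pvBv triples v).map (fun i => (v, i)) := by
      unfold pvI pvBv
      induction (PySem.List.enumerate triples 0) with
      | nil => rfl
      | cons p ps ih =>
        rw [List.flatMap_cons, List.filter_append, ih, List.filter_cons]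
        have hchunk : ((PySem.Set.ofList p.2).map (fun u => (u, p.1))).filter (fun q => q.1 == v)
            = if v ∈ PySem.Set.ofList p.2 then [(v, p.1)] else [] := by
          rw [List.filter_map]
          have : (PySem.Set.ofList p.2).filter ((fun (q : Int × Int) => q.1 == v) ∘ (fun u => (u, p.1)))
              = (PySem.Set.ofList p.2).filter (fun u => u == v) := rfl
          rw [this, List.filter_beq, pv_nodup_count _ (PySem.Set.nodup_ofList _) v]
          by_cases hv : v ∈ PySem.Set.ofList p.2 <;> simp [hv]
        rw [hchunk]
        by_cases hv : v ∈ PySem.Set.ofList p.2 <;> simp [hv]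
    rw [hfil, List.map_map]
    simp
  have hvals : ((pvI triples).foldl (fun d q => d.modify q.1 [] (fun l => l ++ [q.2]))
      PySem.Dict.empty).values = (pvV triples).map (pvBv triples) := by
    rw [PySem.Dict.values_eq_map_keys _ hnodup [], hkeys]
    exact List.map_congr_left (fun v _ => hgetD v)
  rw [hvals]
  rw [pv_foldl_flatten]
  have hflat : ((pvV triples).map (pvBv triples)).flatMap (fun m => pvPairsAux m []) = pvL triples := by
    rw [List.flatMap_map]
    unfold pvL
    exact List.flatMap_congr (fun v _ => by simp [pvPairsAux_eq])
  rw [hflat]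
  rw [PySem.Dict.foldl_insert_getD_add_one_eq_counter (pvL triples)]
  have hvals2 : (PySem.Dict.counter (pvL triples)).values
      = (PySem.Set.ofList (pvL triples)).map (fun k => ((pvL triples).count k : Int)) := by
    show (PySem.Dict.counter (pvL triples)).items.map (fun q => q.2) = _
    rw [PySem.Dict.items_counter, List.map_map]
    rfl
  rw [hvals2]
  have h := PySem.List.foldl_count_if (fun c : Int => decide (c = 1))
    ((PySem.Set.ofList (pvL triples)).map (fun k => ((pvL triples).count k : Int))) 0
  simp only [decide_eq_true_eq, zero_add] at h
  rw [h, List.countP_map]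
  rfl

theorem pv_main (triples : List (List Int)) :
    (PySem.Set.ofList (pvL triples)).countP (fun k => decide (((pvL triples).count k : Int) = 1))
      = (pvAllPairs triples).countP (pvDelta triples) := by
  apply pv_countP_nodup_ext _ _ _ _ (PySem.Set.nodup_ofList _) (pvAllPairs_nodup triples)
  intro x
  constructor
  · rintro ⟨hxK, hcnt⟩
    have hxL : x ∈ pvL triples := (PySem.Set.mem_ofList _ _).mp hxK
    obtain ⟨i, j, hi, hj, rfl, hij⟩ := pvL_mem_wf triples x hxL
    simp only [decide_eq_true_eq] at hcnt
    rw [pvL_count_eq_inter triples i j hi hj hij] at hcnt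
    refine ⟨(pvAllPairs_mem triples _).mpr
      ⟨by show (0 : Int) ≤ (i : Int); positivity, hij,
        by show (j : Int) < ((triples.length : Int)); exact_mod_cast hj⟩, ?_⟩
    rw [pvDelta_eq triples i j hi hj]
    simp only [decide_eq_true_eq]
    omega
  · rintro ⟨hxA, hδ⟩
    obtain ⟨h0, h12, h2n⟩ := (pvAllPairs_mem triples x).mp hxA
    obtain ⟨x1, x2⟩ := x
    have h0' : (0 : Int) ≤ x1 := h0
    have h12' : x1 < x2 := h12
    have h2n' : x2 < (triples.length : Int) := h2n
    obtain ⟨i, rfl⟩ : ∃ i : Nat, x1 = (i : Int) := ⟨x1.toNat, (Int.toNat_of_nonneg h0').symm⟩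
    obtain ⟨j, rfl⟩ : ∃ j : Nat, x2 = (j : Int) :=
      ⟨x2.toNat, (Int.toNat_of_nonneg (by omega)).symm⟩
    have hj : j < triples.length := by exact_mod_cast h2n'
    have hi : i < triples.length := by
      have : (i : Int) < (j : Int) := h12'
      omega
    rw [pvDelta_eq triples i j hi hj] at hδ
    simp only [decide_eq_true_eq] at hδ
    have hcount1 : (pvL triples).count ((i : Int), (j : Int)) = 1 := by
      rw [pvL_count_eq_inter triples i j hi hj h12', hδ]
    refine ⟨(PySem.Set.mem_ofList _ _).mpr (List.count_pos_iff.mp ?_), by simp [hcount1]⟩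
    rw [hcount1]
    omega

-- ===== VERDICT (by name: the statement is the Claim_ definition above) =====
theorem vertex_sharing_pairs_spec : Claim_equal_vertex_sharing_pairs := by
  intro triples _
  unfold Spec_vertex_sharing_pairs
  rw [pvA_eq, pvB_eq, pv_main]
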